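-- pv_equiv track=rewrite | github.com/thlabbe/AOC2023 | day1.py | rech_droite_gauche
-- ===== SOURCE A (Python) =====
-- def rech_droite_gauche(l, dic):
--     res = []
--     keys = dic.keys()
--     for i in range(len(l), 0, -1):
--         for k in keys:
--             if l[:i].endswith(k):
--                 res.append({"pos": i, "key": k, "value": dic.get(k)})
--
--     return res[0].get("value")
-- ===== SOURCE B (Python) =====
-- def rech_droite_gauche(l, dic):
--     # One pass over the dict: rightmost ending position per key via str.rfind,
--     # keep the first key (in dict order) whose ending position is strictly largest.
--     best_end = 0
--     best_val = None
--     for k, v in dic.items():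
--         r = l.rfind(k)
--         if r != -1 and r + len(k) > best_end:
--             best_end, best_val = r + len(k), v
--     if best_val is None:
--         raise IndexError("no key matches")
--     return best_val
-- ===== Notes on version B (the rewrite author's own statement) =====
-- stated objective: alternative
-- what changed: A scans every prefix length i from len(l) down to 1 and tests l[:i].endswith(k) for every key, collecting all matches and returning the first; B makes a single pass over the dict, computing each key's rightmost ending position with one l.rfind(k) call and keeping the first key (in dict order) with the strictly largest ending position.
import Mathlib
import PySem

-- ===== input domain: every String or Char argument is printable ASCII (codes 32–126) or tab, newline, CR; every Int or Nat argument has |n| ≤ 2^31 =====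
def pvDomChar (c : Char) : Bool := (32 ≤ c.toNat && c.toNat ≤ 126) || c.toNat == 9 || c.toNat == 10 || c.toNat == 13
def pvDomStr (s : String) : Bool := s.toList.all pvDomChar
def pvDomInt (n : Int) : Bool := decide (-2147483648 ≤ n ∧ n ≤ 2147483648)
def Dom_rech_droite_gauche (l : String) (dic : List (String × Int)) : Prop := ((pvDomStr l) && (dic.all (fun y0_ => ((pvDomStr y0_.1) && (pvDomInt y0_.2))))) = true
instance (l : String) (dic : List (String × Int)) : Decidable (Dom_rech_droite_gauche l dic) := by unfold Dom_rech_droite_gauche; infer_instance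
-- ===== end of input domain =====

-- B replaces A's O(len(l)·|dic|·len(l)) scan of every prefix by one str.rfind pass per key

-- B replaces A's scan of every prefix of l by a single str.rfind pass per dict key
-- (the first key in dict order with the strictly largest rightmost ending position wins).

-- ===== PORT A =====
def rech_droite_gauche (l : String) (dic : List (String × Int)) : Int :=
  let d := PySem.Dict.ofList dic
  let keys := d.keys
  let res : List (Int × String × Option Int) :=
    (PySem.List.pyRange (PySem.Str.len l) 0 (-1)).foldl
      (fun res i =>
        keys.foldl
          (fun res k =>
            if PySem.Str.endswith (PySem.Str.slice l none (some i)) k = true then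
              res ++ [(i, k, d.get? k)]
            else res)
          res)
      []
  -- res[0].get("value"); Python raises IndexError on empty res (excluded by Pre_)
  match PySem.List.pyGet? res 0 with
  | some t => (t.2.2).getD 0
  | none => 0

-- ===== PORT B =====
def rech_droite_gauche_alt (l : String) (dic : List (String × Int)) : Int :=
  let d := PySem.Dict.ofList dic
  let st :=
    d.items.foldl
      (fun (st : Int × Option Int) kv =>
        let r := PySem.Str.rfind l kv.1
        if r ≠ -1 ∧ r + PySem.Str.len kv.1 > st.1 then
          (r + PySem.Str.len kv.1, some kv.2)
        else st)
      (0, none)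
  match st.2 with
  | some v => v
  | none => 0  -- Python raises IndexError here (excluded by Pre_)

-- ===== PRECONDITION & SPEC =====
-- Pre_ excludes exactly the inputs where A raises IndexError (res stays empty): no key of dic
-- occurs in l with an ending position ≥ 1 (an empty key only matches a non-empty l).
def Pre_rech_droite_gauche (l : String) (dic : List (String × Int)) : Prop :=
  ∃ p ∈ dic, PySem.Str.isIn p.1 l = true ∧ (p.1 = "" → l ≠ "")
instance (l : String) (dic : List (String × Int)) : Decidable (Pre_rech_droite_gauche l dic) := by
  unfold Pre_rech_droite_gauche; infer_instance

def pvWitness_rech_droite_gauche : String × (List (String × Int)) := ("a1", [("1", 1)])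

def Spec_rech_droite_gauche (l : String) (dic : List (String × Int)) (out : Int) : Prop := out = rech_droite_gauche_alt l dic
instance (l : String) (dic : List (String × Int)) (out : Int) : Decidable (Spec_rech_droite_gauche l dic out) := by unfold Spec_rech_droite_gauche; infer_instance

-- ===== CLAIM (what is proved, stated in full; the proofs are below) =====
def Claim_equal_rech_droite_gauche : Prop := ∀ (l : String) (dic : List (String × Int)), Dom_rech_droite_gauche l dic → Pre_rech_droite_gauche l dic → Spec_rech_droite_gauche l dic (rech_droite_gauche l dic)

-- ===== LEMMAS AND PROOFS =====

lemma rdg_go_zero (s sub : List Char) :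
    PySem.Chars.rfind.go s sub 0 = if sub.isPrefixOf s then 0 else -1 := by
  simp [PySem.Chars.rfind.go]

lemma rdg_go_succ (s sub : List Char) (j : Nat) :
    PySem.Chars.rfind.go s sub (j+1) =
      if sub.isPrefixOf (s.drop (j+1)) then ((j:Int)+1) else PySem.Chars.rfind.go s sub j := by
  simp [PySem.Chars.rfind.go]

lemma rdg_go_cases (s sub : List Char) (j : Nat) :
    (PySem.Chars.rfind.go s sub j = -1 ∧ ∀ t : Nat, t ≤ j → ¬ sub <+: s.drop t)
    ∨ (∃ t : Nat, t ≤ j ∧ PySem.Chars.rfind.go s sub j = t ∧ sub <+: s.drop t ∧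
        ∀ u : Nat, t < u → u ≤ j → ¬ sub <+: s.drop u) := by
  induction j with
  | zero =>
    rw [rdg_go_zero]
    by_cases hp : sub.isPrefixOf s
    · right
      refine ⟨0, le_refl _, by simp [hp], by simpa using List.isPrefixOf_iff_prefix.mp hp, ?_⟩
      intro u hu hu'; omega
    · left
      refine ⟨by simp [hp], ?_⟩
      intro t ht
      interval_cases t
      simpa using fun h => hp (List.isPrefixOf_iff_prefix.mpr h)
  | succ j ih =>
    rw [rdg_go_succ]
    by_cases hp : sub.isPrefixOf (s.drop (j+1))
    · right
      refine ⟨j+1, le_refl _, by simp [hp], List.isPrefixOf_iff_prefix.mp hp, ?_⟩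
      intro u hu hu'; omega
    · rcases ih with ⟨hgo, hall⟩ | ⟨t, ht, hgo, hpre, hmax⟩
      · left
        refine ⟨by simp [hp, hgo], ?_⟩
        intro t ht
        rcases Nat.lt_or_ge t (j+1) with h | h
        · exact hall t (by omega)
        · have : t = j + 1 := by omega
          subst this
          exact fun h => hp (List.isPrefixOf_iff_prefix.mpr h)
      · right
        refine ⟨t, by omega, by simp [hp, hgo], hpre, ?_⟩
        intro u hu hu'
        rcases Nat.lt_or_ge u (j+1) with h | h
        · exact hmax u hu (by omega)
        · have : u = j + 1 := by omega
          subst this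
          exact fun h => hp (List.isPrefixOf_iff_prefix.mpr h)

lemma rdg_rfind_mem (cs k : List Char) (h : PySem.Chars.rfind cs k ≠ -1) :
    0 ≤ PySem.Chars.rfind cs k ∧ (PySem.Chars.rfind cs k).toNat ≤ cs.length ∧
    k <+: cs.drop (PySem.Chars.rfind cs k).toNat ∧
    ∀ u : Nat, PySem.Chars.rfind cs k < (u:Int) → u ≤ cs.length → ¬ k <+: cs.drop u := by
  have := rdg_go_cases cs k cs.length
  rcases this with ⟨hgo, _⟩ | ⟨t, ht, hgo, hpre, hmax⟩
  · exact absurd (show PySem.Chars.rfind cs k = -1 from hgo) h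
  · have hr : PySem.Chars.rfind cs k = t := hgo
    refine ⟨by omega, by simpa [hr] using ht, by simpa [hr] using hpre, ?_⟩
    intro u hu hu'
    exact hmax u (by omega) hu'

lemma rdg_rfind_none (cs k : List Char) (h : PySem.Chars.rfind cs k = -1) :
    ∀ t : Nat, t ≤ cs.length → ¬ k <+: cs.drop t := by
  have := rdg_go_cases cs k cs.length
  rcases this with ⟨_, hall⟩ | ⟨t, ht, hgo, hpre, hmax⟩
  · exact hall
  · have hr : PySem.Chars.rfind cs k = t := hgo
    exfalso; rw [h] at hr; omega

lemma rdg_rfind_nil (cs : List Char) : PySem.Chars.rfind cs [] = cs.length := by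
  show PySem.Chars.rfind.go cs [] cs.length = cs.length
  cases h : cs.length with
  | zero => rw [rdg_go_zero]; simp
  | succ j => rw [rdg_go_succ]; simp

lemma rdg_suffix_take_iff (cs k : List Char) (i : Nat) (hi : i ≤ cs.length) :
    k <:+ cs.take i ↔ k.length ≤ i ∧ k <+: cs.drop (i - k.length) := by
  constructor
  · rintro ⟨pre, hpre⟩
    have hlen : pre.length + k.length = i := by
      have := congrArg List.length hpre
      simp at this
      omega
    have hk : k.length ≤ i := by omega
    refine ⟨hk, ⟨cs.drop i, ?_⟩⟩
    have h1 : cs = (pre ++ k) ++ cs.drop i := by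
      rw [hpre]
      exact (List.take_append_drop i cs).symm
    have h2 : cs.drop (i - k.length) = List.drop (i - k.length) ((pre ++ k) ++ cs.drop i) := by
      rw [← h1]
    have hnil : List.drop (i - k.length) pre = [] := by
      apply List.drop_eq_nil_of_le; omega
    rw [h2, List.append_assoc, List.drop_append_of_le_length (by simp; omega), hnil]
    simp
  · rintro ⟨hk, ⟨suf, hsuf⟩⟩
    refine ⟨cs.take (i - k.length), ?_⟩
    conv_rhs => rw [show i = (i - k.length) + k.length by omega, List.take_add]
    congr 1
    rw [← hsuf]
    simp

def rdgE (cs : List Char) (k : String) : Int := PySem.Chars.rfind cs k.toList + k.toList.length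

lemma rdg_ends_good (cs : List Char) (k : String) (i : Nat) (h1 : 1 ≤ i) (h2 : i ≤ cs.length)
    (h : k.toList <:+ cs.take i) :
    PySem.Chars.rfind cs k.toList ≠ -1 ∧ (i : Int) ≤ rdgE cs k := by
  rcases (rdg_suffix_take_iff cs k.toList i h2).mp h with ⟨hk, hpre⟩
  have hr : PySem.Chars.rfind cs k.toList ≠ -1 := by
    intro hneg
    exact rdg_rfind_none cs k.toList hneg (i - k.toList.length) (by omega) hpre
  rcases rdg_rfind_mem cs k.toList hr with ⟨h0, hle, _, hmax⟩
  have : ¬ PySem.Chars.rfind cs k.toList < ((i - k.toList.length : Nat) : Int) := by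
    intro hlt
    exact hmax _ hlt (by omega) hpre
  refine ⟨hr, ?_⟩
  unfold rdgE
  push_cast at this ⊢
  omega

lemma rdg_good_ends (cs : List Char) (k : String)
    (hr : PySem.Chars.rfind cs k.toList ≠ -1) (he : 1 ≤ rdgE cs k) :
    rdgE cs k ≤ cs.length ∧ k.toList <:+ cs.take (rdgE cs k).toNat := by
  rcases rdg_rfind_mem cs k.toList hr with ⟨h0, hle, hpre, _⟩
  have hlen : k.toList.length ≤ cs.length - (PySem.Chars.rfind cs k.toList).toNat := by
    have := hpre.length_le
    simpa using this
  have hEn : rdgE cs k ≤ cs.length := by unfold rdgE; omega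
  refine ⟨hEn, ?_⟩
  rw [rdg_suffix_take_iff cs k.toList _ (by omega)]
  constructor
  · unfold rdgE at he ⊢; omega
  · have : (rdgE cs k).toNat - k.toList.length = (PySem.Chars.rfind cs k.toList).toNat := by
      unfold rdgE; omega
    rw [this]; exact hpre

def rdgStep (cs : List Char) (st : Int × Option Int) (kv : String × Int) : Int × Option Int :=
  if PySem.Chars.rfind cs kv.1.toList ≠ -1 ∧ rdgE cs kv.1 > st.1 then (rdgE cs kv.1, some kv.2) else st

def rdgBest (cs : List Char) (its : List (String × Int)) (m : Int) : Int :=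
  its.foldl (fun m kv => if PySem.Chars.rfind cs kv.1.toList ≠ -1 ∧ rdgE cs kv.1 > m then rdgE cs kv.1 else m) m

def rdgPick (cs : List Char) (E : Int) (kv : String × Int) : Bool :=
  (PySem.Chars.rfind cs kv.1.toList != -1) && decide (rdgE cs kv.1 = E)

lemma rdg_best_cons (cs : List Char) (kv : String × Int) (its : List (String × Int)) (m : Int) :
    rdgBest cs (kv :: its) m
      = rdgBest cs its (if PySem.Chars.rfind cs kv.1.toList ≠ -1 ∧ rdgE cs kv.1 > m then rdgE cs kv.1 else m) := rfl

lemma rdg_best_mono (cs : List Char) (its : List (String × Int)) (m : Int) : m ≤ rdgBest cs its m := by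
  induction its generalizing m with
  | nil => simp [rdgBest]
  | cons kv its ih =>
    rw [rdg_best_cons]
    by_cases hcond : PySem.Chars.rfind cs kv.1.toList ≠ -1 ∧ rdgE cs kv.1 > m
    · rw [if_pos hcond]; exact le_trans (by omega) (ih _)
    · rw [if_neg hcond]; exact ih m

lemma rdg_best_ub (cs : List Char) (its : List (String × Int)) (m : Int) :
    ∀ kv ∈ its, PySem.Chars.rfind cs kv.1.toList ≠ -1 → rdgE cs kv.1 ≤ rdgBest cs its m := by
  induction its generalizing m with
  | nil => simp
  | cons kv its ih =>
    intro kv' hkv' hr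
    rw [rdg_best_cons]
    by_cases hcond : PySem.Chars.rfind cs kv.1.toList ≠ -1 ∧ rdgE cs kv.1 > m
    · rw [if_pos hcond]
      rcases List.mem_cons.mp hkv' with h | h
      · subst h; exact rdg_best_mono cs its _
      · exact ih _ kv' h hr
    · rw [if_neg hcond]
      rcases List.mem_cons.mp hkv' with h | h
      · subst h
        push_neg at hcond
        exact le_trans (hcond hr) (rdg_best_mono cs its m)
      · exact ih _ kv' h hr

lemma rdg_best_cases (cs : List Char) (its : List (String × Int)) (m : Int) :
    rdgBest cs its m = m ∨
      ∃ kv ∈ its, PySem.Chars.rfind cs kv.1.toList ≠ -1 ∧ rdgBest cs its m = rdgE cs kv.1 := by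
  induction its generalizing m with
  | nil => left; simp [rdgBest]
  | cons kv its ih =>
    by_cases hcond : PySem.Chars.rfind cs kv.1.toList ≠ -1 ∧ rdgE cs kv.1 > m
    · rcases ih (rdgE cs kv.1) with h | ⟨kv', hkv', hr', h⟩
      · right; exact ⟨kv, List.mem_cons_self, hcond.1, by rw [rdg_best_cons, if_pos hcond]; exact h⟩
      · right; exact ⟨kv', List.mem_cons_of_mem _ hkv', hr', by rw [rdg_best_cons, if_pos hcond]; exact h⟩
    · rcases ih m with h | ⟨kv', hkv', hr', h⟩
      · left; rw [rdg_best_cons, if_neg hcond]; exact h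
      · right; exact ⟨kv', List.mem_cons_of_mem _ hkv', hr', by rw [rdg_best_cons, if_neg hcond]; exact h⟩

lemma rdg_fold_stay (cs : List Char) (its : List (String × Int)) (st : Int × Option Int)
    (h : rdgBest cs its st.1 = st.1) : its.foldl (rdgStep cs) st = st := by
  induction its generalizing st with
  | nil => simp
  | cons kv its ih =>
    by_cases hcond : PySem.Chars.rfind cs kv.1.toList ≠ -1 ∧ rdgE cs kv.1 > st.1
    · exfalso
      rw [rdg_best_cons, if_pos hcond] at h
      have := rdg_best_mono cs its (rdgE cs kv.1)
      omega
    · show its.foldl (rdgStep cs) (rdgStep cs st kv) = st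
      rw [show rdgStep cs st kv = st from by unfold rdgStep; rw [if_neg hcond]]
      apply ih
      rw [rdg_best_cons, if_neg hcond] at h
      exact h

lemma rdg_fold_snd (cs : List Char) (its : List (String × Int)) (st : Int × Option Int)
    (h : rdgBest cs its st.1 > st.1) :
    (its.foldl (rdgStep cs) st).2 =
      (its.find? (rdgPick cs (rdgBest cs its st.1))).map (·.2) := by
  induction its generalizing st with
  | nil => simp [rdgBest] at h
  | cons kv its ih =>
    by_cases hcond : PySem.Chars.rfind cs kv.1.toList ≠ -1 ∧ rdgE cs kv.1 > st.1
    · have hstep : rdgStep cs st kv = (rdgE cs kv.1, some kv.2) := by unfold rdgStep; rw [if_pos hcond]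
      have hE : rdgBest cs (kv :: its) st.1 = rdgBest cs its (rdgE cs kv.1) := by
        rw [rdg_best_cons, if_pos hcond]
      by_cases hrec : rdgBest cs its (rdgE cs kv.1) > rdgE cs kv.1
      · show (its.foldl (rdgStep cs) (rdgStep cs st kv)).2 = _
        rw [hstep, ih ⟨rdgE cs kv.1, some kv.2⟩ (by simpa using hrec)]
        rw [hE]
        congr 1
        rw [List.find?_cons_of_neg]
        simp [rdgPick]
        intro _
        omega
      · have heq : rdgBest cs its (rdgE cs kv.1) = rdgE cs kv.1 := by
          have := rdg_best_mono cs its (rdgE cs kv.1); omega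
        show (its.foldl (rdgStep cs) (rdgStep cs st kv)).2 = _
        rw [hstep, rdg_fold_stay cs its _ (by simpa using heq)]
        rw [hE, heq]
        rw [List.find?_cons_of_pos]
        · rfl
        · simp [rdgPick, hcond.1]
    · have hstep : rdgStep cs st kv = st := by unfold rdgStep; rw [if_neg hcond]
      have hE : rdgBest cs (kv :: its) st.1 = rdgBest cs its st.1 := by
        rw [rdg_best_cons, if_neg hcond]
      show (its.foldl (rdgStep cs) (rdgStep cs st kv)).2 = _
      rw [hstep, ih st (by rw [hE] at h; exact h), hE]
      congr 1
      rw [List.find?_cons_of_neg]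
      simp [rdgPick]
      intro hr
      push_neg at hcond
      have := hcond hr
      omega

lemma rdg_find?_congr {α : Type} (p q : α → Bool) (l : List α) (h : ∀ a ∈ l, p a = q a) :
    l.find? p = l.find? q := by
  induction l with
  | nil => rfl
  | cons a l ih =>
    rw [List.find?_cons, List.find?_cons, h a List.mem_cons_self, ih (fun a ha => h a (List.mem_cons_of_mem _ ha))]

lemma rdg_outer (xs : List Int) (keys : List String) (g : String → Option Int)
    (endsAt : Int → String → Bool) (init : List (Int × String × Option Int)) :
    xs.foldl (fun res i => keys.foldl
        (fun r k => if endsAt i k = true then r ++ [(i, k, g k)] else r) res) init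
      = init ++ xs.flatMap (fun i => (keys.filter (endsAt i)).map (fun k => (i, k, g k))) := by
  have inner : ∀ (i : Int) (res : List (Int × String × Option Int)) (ks : List String),
      ks.foldl (fun r k => if endsAt i k = true then r ++ [(i, k, g k)] else r) res
        = res ++ (ks.filter (endsAt i)).map (fun k => (i, k, g k)) := by
    intro i res ks
    induction ks generalizing res with
    | nil => simp
    | cons k ks ih =>
      rw [List.foldl_cons, List.filter_cons]
      by_cases hk : endsAt i k = true
      · rw [if_pos hk, ih, if_pos hk]
        simp
      · rw [if_neg hk, ih, if_neg (by simpa using hk)]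
  induction xs generalizing init with
  | nil => simp
  | cons x xs ih =>
    rw [List.foldl_cons, ih, inner, List.flatMap_cons, List.append_assoc]

lemma rdg_range (n : Nat) :
    PySem.List.pyRange (n : Int) 0 (-1) = (List.range n).map (fun k : Nat => (n : Int) - (k : Int)) := by
  unfold PySem.List.pyRange
  rcases Nat.eq_zero_or_pos n with h | h
  · subst h; simp
  · rw [if_neg (by norm_num)]
    simp only
    rw [if_neg (by norm_num), if_pos (by exact_mod_cast h)]
    have h1 : (((n : Int) - 0 + - -1 - 1) / - -1) = (n : Int) := by norm_num
    rw [h1, Int.toNat_natCast]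
    apply List.map_congr_left
    intro k hk
    push_cast
    ring

lemma rdg_findSome_desc {α : Type} (f : Int → Option α) (x : α) :
    ∀ (c : Nat) (n E : Int), n - c < E → E ≤ n →
      (∀ i : Int, E < i → i ≤ n → f i = none) → f E = some x →
      (((List.range c).map (fun k : Nat => (n : Int) - (k : Int))).findSome? f) = some x := by
  intro c
  induction c with
  | zero => intro n E h1 h2 _ _; simp at h1; omega
  | succ c ih =>
    intro n E h1 h2 hnone hsome
    rw [List.range_succ_eq_map]
    rw [List.map_cons, List.findSome?_cons]
    have h0 : ((n : Int) - ((0:Nat):Int)) = n := by norm_num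
    rw [h0]
    rcases eq_or_lt_of_le h2 with he | he
    · rw [← he, hsome]
    · rw [hnone n he (by omega)]
      simp only
      have : (List.map Nat.succ (List.range c)).map (fun k : Nat => (n : Int) - (k : Int))
          = (List.range c).map (fun k : Nat => ((n - 1 : Int)) - (k : Int)) := by
        rw [List.map_map]
        apply List.map_congr_left
        intro k hk
        simp [Nat.succ_eq_add_one]
        push_cast
        ring
      rw [this]
      exact ih (n-1) E (by push_cast at h1 ⊢; omega) (by omega) (fun i hi hi' => hnone i hi (by omega)) hsome

-- ===== VERDICT (by name: the statement is the Claim_ definition above) =====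
theorem rech_droite_gauche_spec : Claim_equal_rech_droite_gauche := by
  intro l dic _ hpre
  unfold Spec_rech_droite_gauche
  have hkeys : (PySem.Dict.ofList dic).keys = (PySem.Dict.ofList dic).items.map (fun x => x.1) := rfl
  obtain ⟨p, hp, hin, hnv⟩ := hpre
  -- abbreviations (plain haves, everything stated explicitly)
  have hr0 : PySem.Chars.rfind l.toList p.1.toList ≠ -1 ∧ 1 ≤ rdgE l.toList p.1 := by
    by_cases hk0 : p.1.toList = []
    · have hpe : p.1 = "" := String.toList_eq_nil_iff.mp hk0
      have hlne : l.toList ≠ [] := by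
        intro hnil
        exact hnv hpe (String.toList_eq_nil_iff.mp hnil)
      have hlen : 1 ≤ l.toList.length := by
        cases hl : l.toList with
        | nil => exact absurd hl hlne
        | cons a t => simp
      constructor
      · rw [hk0, rdg_rfind_nil l.toList]
        omega
      · unfold rdgE
        rw [hk0, rdg_rfind_nil l.toList]
        simp only [List.length_nil]
        push_cast
        omega
    · have hinC : PySem.Chars.isIn p.1.toList l.toList = true := by
        rw [PySem.Str.isIn_eq] at hin
        exact hin
      obtain ⟨t, hprf⟩ := (PySem.Chars.exists_prefix_drop_iff_isIn p.1.toList l.toList).mpr hinC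
      have htn : t ≤ l.toList.length := by
        by_contra hgt
        push_neg at hgt
        have hdnil : l.toList.drop t = [] := List.drop_eq_nil_of_le (by omega)
        rw [hdnil] at hprf
        exact hk0 (List.prefix_nil.mp hprf)
      have hr : PySem.Chars.rfind l.toList p.1.toList ≠ -1 := by
        intro hneg
        exact rdg_rfind_none l.toList p.1.toList hneg t htn hprf
      refine ⟨hr, ?_⟩
      rcases rdg_rfind_mem l.toList p.1.toList hr with ⟨h0, _, _, _⟩
      have hl1 : 1 ≤ p.1.toList.length := by
        cases hcl : p.1.toList with
        | nil => exact absurd hcl hk0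
        | cons a t => simp
      unfold rdgE
      omega
  -- p.1 is a key of the dict, hence appears among its items
  obtain ⟨kv0, hkv0, hkv0e⟩ : ∃ kv ∈ (PySem.Dict.ofList dic).items, kv.1 = p.1 := by
    have hk : p.1 ∈ (PySem.Dict.ofList dic).keys := by
      have hku : (PySem.Dict.ofList dic).keys
          = PySem.Set.update (PySem.Dict.empty : PySem.Dict String Int).keys (dic.map Prod.fst) :=
        PySem.Dict.keys_foldl_insert_key dic Prod.fst (fun _ x => x.2) PySem.Dict.empty
      rw [hku, PySem.Set.mem_update]
      right
      exact List.mem_map.mpr ⟨p, hp, rfl⟩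
    rw [hkeys] at hk
    obtain ⟨kv, hkv, heq⟩ := List.mem_map.mp hk
    exact ⟨kv, hkv, heq⟩
  -- bounds on the best ending position E
  have hE1 : 1 ≤ rdgBest l.toList (PySem.Dict.ofList dic).items 0 := by
    have hub := rdg_best_ub l.toList (PySem.Dict.ofList dic).items 0 kv0 hkv0 (by rw [hkv0e]; exact hr0.1)
    rw [hkv0e] at hub
    omega
  have hEn : rdgBest l.toList (PySem.Dict.ofList dic).items 0 ≤ l.toList.length := by
    rcases rdg_best_cases l.toList (PySem.Dict.ofList dic).items 0 with h | ⟨kv', _, hr', hEe⟩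
    · omega
    · have hle := (rdg_good_ends l.toList kv'.1 hr' (by omega)).1
      omega
  -- the winning entry kv
  have hfindSome : ((PySem.Dict.ofList dic).items.find?
      (rdgPick l.toList (rdgBest l.toList (PySem.Dict.ofList dic).items 0))).isSome = true := by
    rcases rdg_best_cases l.toList (PySem.Dict.ofList dic).items 0 with h | ⟨kv', hkv', hr', hEe⟩
    · omega
    · exact List.find?_isSome.mpr ⟨kv', hkv', by simp [rdgPick, hr']; omega⟩
  obtain ⟨kv, hfind⟩ := Option.isSome_iff_exists.mp hfindSome
  have hkvm : kv ∈ (PySem.Dict.ofList dic).items := List.mem_of_find?_eq_some hfind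
  have hkvp := List.find?_some hfind
  have hkvr : PySem.Chars.rfind l.toList kv.1.toList ≠ -1 := by
    simp [rdgPick] at hkvp; exact hkvp.1
  have hkve : rdgE l.toList kv.1 = rdgBest l.toList (PySem.Dict.ofList dic).items 0 := by
    simp [rdgPick] at hkvp; exact hkvp.2
  -- Python's l[:i].endswith(k) as a suffix-of-take statement
  have hbridge : ∀ (i : Int) (k : String), 0 ≤ i →
      (PySem.Str.endswith (PySem.Str.slice l none (some i)) k = true ↔ k.toList <:+ l.toList.take i.toNat) := by
    intro i k hi
    rw [PySem.Str.endswith_eq, PySem.Str.toList_slice, PySem.Chars.slice_eq_listSlice,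
      PySem.List.slice_to _ hi, PySem.Chars.endswith_iff]
  -- the dict lookup at the winning key
  have hget : (PySem.Dict.ofList dic).get? kv.1 = some kv.2 :=
    PySem.Dict.get?_of_mem_items (PySem.Dict.ofList dic) hkvm (PySem.Dict.nodup_keys_ofList dic)
  -- value of B
  have hB : rech_droite_gauche_alt l dic = kv.2 := by
    show (match ((PySem.Dict.ofList dic).items.foldl (rdgStep l.toList) (0, none)).2 with
      | some v => v
      | none => 0) = kv.2
    rw [rdg_fold_snd l.toList (PySem.Dict.ofList dic).items (0, none) (by simpa using hE1), hfind]
    rfl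
  -- value of A
  have hA : rech_droite_gauche l dic = kv.2 := by
    show (match PySem.List.pyGet?
        ((PySem.List.pyRange ((l.toList.length : Nat) : Int) 0 (-1)).foldl
          (fun res i => ((PySem.Dict.ofList dic).items.map (fun x => x.1)).foldl
            (fun r k => if PySem.Str.endswith (PySem.Str.slice l none (some i)) k = true then
                r ++ [(i, k, (PySem.Dict.ofList dic).get? k)]
              else r) res) []) 0 with
      | some t => (t.2.2).getD 0
      | none => 0) = kv.2
    rw [rdg_outer ((PySem.List.pyRange ((l.toList.length : Nat) : Int) 0 (-1)))
        ((PySem.Dict.ofList dic).items.map (fun x => x.1)) (fun k => (PySem.Dict.ofList dic).get? k)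
        (fun i k => PySem.Str.endswith (PySem.Str.slice l none (some i)) k) []]
    rw [List.nil_append, rdg_range l.toList.length, PySem.List.pyGet?_zero, ← List.head?_eq_getElem?,
      List.head?_flatMap]
    have hnone : ∀ i : Int, rdgBest l.toList (PySem.Dict.ofList dic).items 0 < i →
        i ≤ (l.toList.length : Int) →
        ((((PySem.Dict.ofList dic).items.map (fun x : String × Int => x.1)).filter
            (fun k => PySem.Str.endswith (PySem.Str.slice l none (some i)) k)).map
            (fun k => (i, k, (PySem.Dict.ofList dic).get? k))).head? = none := by
      intro i hiE hin'
      rw [List.head?_map, List.head?_filter]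
      have hnofind : List.find? (fun k => PySem.Str.endswith (PySem.Str.slice l none (some i)) k)
          ((PySem.Dict.ofList dic).items.map (fun x : String × Int => x.1)) = none := by
        rw [List.find?_eq_none]
        intro k hk hends
        have hsuf := (hbridge i k (by omega)).mp hends
        have hgood := rdg_ends_good l.toList k i.toNat (by omega) (by omega) hsuf
        obtain ⟨kv', hkv', hkv'e⟩ := List.mem_map.mp hk
        have hub := rdg_best_ub l.toList (PySem.Dict.ofList dic).items 0 kv' hkv'
          (by rw [hkv'e]; exact hgood.1)
        rw [hkv'e] at hub
        have hcast : ((i.toNat : Nat) : Int) = i := by omega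
        rw [hcast] at hgood
        omega
      rw [hnofind]
      rfl
    have hsome : ((((PySem.Dict.ofList dic).items.map (fun x : String × Int => x.1)).filter
          (fun k => PySem.Str.endswith (PySem.Str.slice l none
            (some (rdgBest l.toList (PySem.Dict.ofList dic).items 0))) k)).map
          (fun k => ((rdgBest l.toList (PySem.Dict.ofList dic).items 0), k,
            (PySem.Dict.ofList dic).get? k))).head?
        = some ((rdgBest l.toList (PySem.Dict.ofList dic).items 0), kv.1,
            (PySem.Dict.ofList dic).get? kv.1) := by
      rw [List.head?_map, List.head?_filter, List.find?_map]
      have hcongr : List.find?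
          ((fun k => PySem.Str.endswith (PySem.Str.slice l none
              (some (rdgBest l.toList (PySem.Dict.ofList dic).items 0))) k) ∘ (fun x : String × Int => x.1))
          (PySem.Dict.ofList dic).items
          = List.find? (rdgPick l.toList (rdgBest l.toList (PySem.Dict.ofList dic).items 0))
            (PySem.Dict.ofList dic).items := by
        apply rdg_find?_congr
        intro kv' hkv'
        apply Bool.coe_iff_coe.mp
        constructor
        · intro hends
          have hsuf := (hbridge _ kv'.1 (by omega)).mp hends
          have hgood := rdg_ends_good l.toList kv'.1
            (rdgBest l.toList (PySem.Dict.ofList dic).items 0).toNat (by omega) (by omega) hsuf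
          have hub := rdg_best_ub l.toList (PySem.Dict.ofList dic).items 0 kv' hkv' hgood.1
          simp [rdgPick, hgood.1]
          omega
        · intro hpick
          simp [rdgPick] at hpick
          have hends := (rdg_good_ends l.toList kv'.1 hpick.1 (by omega)).2
          exact (hbridge _ kv'.1 (by omega)).mpr (by rw [← hpick.2]; exact hends)
      rw [hcongr, hfind]
      rfl
    have hfs := rdg_findSome_desc _ _ l.toList.length (l.toList.length : Int)
      (rdgBest l.toList (PySem.Dict.ofList dic).items 0) (by omega) hEn hnone hsome
    rw [hfs]
    simp only
    rw [hget]
    rfl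
  rw [hA, hB]
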